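-- pv_equiv track=rewrite | github.com/vsrin008/CS170 | ActivityM3/activity_m3_part2.py | find_whisperers_1d
-- ===== SOURCE A (Python) =====
-- from typing import List, Tuple
--
-- def find_whisperers_1d(row: List[int]) -> Tuple[int, List[int]]:
--     n = len(row)
--     if n == 0:
--         return 0, []
--     elif n == 1:  # Handle single element input
--         return row[0], [1]
--
--     dp = [0] * n  # Dynamic programming table for max urgency sum
--     choice = [0] * n  # To track choices (1 for talking, 0 for not talking)
--
--     # Base cases
--     dp[0] = row[0]
--     choice[0] = 1
--     if row[1] > row[0]:
--         dp[1] = row[1]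
--         choice[1] = 1
--     else:
--         dp[1] = row[0]
--
--     # Fill dp table and make choices
--     for i in range(2, n):
--         if dp[i-2] + row[i] > dp[i-1]:
--             dp[i] = dp[i-2] + row[i]
--             choice[i] = 1
--         else:
--             dp[i] = dp[i-1]
--
--     # Reconstruct choices
--     result = [0] * n
--     i = n-1
--     while i >= 0:
--         if choice[i] == 1:
--             result[i] = 1
--             i -= 2  # Skip the previous student as we can't select adjacent students
--         else:
--             i -= 1
--
--     return dp[-1], result
-- ===== SOURCE B (Python) =====
-- def find_whisperers_1d(row):
--     n = len(row)
--     if n == 0: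
--         return 0, []
--     if n == 1:
--         return row[0], [1]
--     # Single forward pass. State: two DP values (best ending at i-1 and at i)
--     # each paired with its selection, stored as a persistent reversed cons-list
--     # (bit, rest) so extending shares structure in O(1); no dp/choice arrays,
--     # no backward reconstruction loop.
--     d2, s2 = row[0], (1, None)
--     if row[1] > row[0]:
--         d1, s1 = row[1], (1, (0, None))
--     else:
--         d1, s1 = row[0], (0, (1, None))
--     for x in row[2:]:
--         if d2 + x > d1:
--             d2, s2, d1, s1 = d1, s1, d2 + x, (1, (0, s2))
--         else:
--             d2, s2, d1, s1 = d1, s1, d1, (0, s1)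
--     out = []
--     node = s1
--     while node is not None:
--         out.append(node[0])
--         node = node[1]
--     out.reverse()
--     return d1, out
-- ===== Notes on version B (the rewrite author's own statement) =====
-- stated objective: alternative
-- what changed: B replaces A's three-phase scheme (dp table + choice array forward, then a backward index-jumping reconstruction over the choice array) by a single forward pass that carries the two current DP values together with their selections as persistent shared cons-lists (nested tuples), so the dp table, the choice array and the whole backward loop disappear; the selection is read off the final linked list at the end.
import Mathlib
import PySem

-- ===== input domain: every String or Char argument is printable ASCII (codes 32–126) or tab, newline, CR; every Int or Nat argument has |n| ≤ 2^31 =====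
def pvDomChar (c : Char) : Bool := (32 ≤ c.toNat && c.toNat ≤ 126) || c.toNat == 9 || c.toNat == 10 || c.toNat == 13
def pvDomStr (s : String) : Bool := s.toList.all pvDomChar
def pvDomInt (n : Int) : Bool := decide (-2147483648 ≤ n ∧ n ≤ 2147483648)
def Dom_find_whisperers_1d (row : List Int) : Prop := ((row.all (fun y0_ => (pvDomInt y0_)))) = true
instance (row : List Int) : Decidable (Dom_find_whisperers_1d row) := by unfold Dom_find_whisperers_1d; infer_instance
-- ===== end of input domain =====

-- B replaces A's dp table + choice array + backward reconstruction loop by one forward pass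
-- carrying the two DP values with their selections as shared persistent cons-lists;
-- objective: alternative (same O(n) cost, a different algorithmic decomposition).

-- ===== PORT A =====
-- body of "for i in range(2, n)" in A
def loopBodyA (row : List Int) (s : List Int × List Int) (i : Int) : List Int × List Int :=
  let dp := s.1
  let choice := s.2
  if PySem.List.pyGetD dp (i-2) 0 + PySem.List.pyGetD row i 0 > PySem.List.pyGetD dp (i-1) 0 then
    (PySem.List.pySetD dp i (PySem.List.pyGetD dp (i-2) 0 + PySem.List.pyGetD row i 0),
     PySem.List.pySetD choice i 1)
  else
    (PySem.List.pySetD dp i (PySem.List.pyGetD dp (i-1) 0), choice)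

-- A's "while i >= 0" reconstruction loop
def reconA (choice : List Int) (result : List Int) (i : Int) : List Int :=
  if h : 0 ≤ i then
    if PySem.List.pyGetD choice i 0 = 1 then
      reconA choice (PySem.List.pySetD result i 1) (i - 2)
    else
      reconA choice result (i - 1)
  else result
termination_by (i + 1).toNat
decreasing_by all_goals omega

def find_whisperers_1d (row : List Int) : Int × List Int :=
  let n : Int := row.length
  if n = 0 then (0, [])
  else if n = 1 then (PySem.List.pyGetD row 0 0, [1])
  else
    let dp := PySem.List.pySetD (List.replicate row.length (0:Int)) 0 (PySem.List.pyGetD row 0 0)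
    let choice := PySem.List.pySetD (List.replicate row.length (0:Int)) 0 1
    let s :=
      if PySem.List.pyGetD row 1 0 > PySem.List.pyGetD row 0 0 then
        (PySem.List.pySetD dp 1 (PySem.List.pyGetD row 1 0), PySem.List.pySetD choice 1 1)
      else
        (PySem.List.pySetD dp 1 (PySem.List.pyGetD row 0 0), choice)
    let s := (PySem.List.pyRange 2 n 1).foldl (loopBodyA row) s
    let result := reconA s.2 (List.replicate row.length (0:Int)) (n - 1)
    (PySem.List.pyGetD s.1 (-1) 0, result)

-- ===== PORT B =====
-- body of B's single forward loop: state is (d2, s2, d1, s1), the two DP values paired with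
-- their selections as reversed cons-lists (Python's nested (bit, rest) tuples = Lean lists)
def stepB (s : Int × List Int × Int × List Int) (x : Int) : Int × List Int × Int × List Int :=
  let d2 := s.1
  let s2 := s.2.1
  let d1 := s.2.2.1
  let s1 := s.2.2.2
  if d2 + x > d1 then (d1, s1, d2 + x, 1 :: 0 :: s2)
  else (d1, s1, d1, 0 :: s1)

def find_whisperers_1d_alt (row : List Int) : Int × List Int :=
  match row with
  | [] => (0, [])
  | [x] => (x, [1])
  | x :: y :: rest =>
    let init : Int × List Int × Int × List Int :=
      if y > x then (x, [1], y, [1, 0]) else (x, [1], x, [0, 1])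
    let fin := rest.foldl stepB init
    (fin.2.2.1, fin.2.2.2.reverse)

-- ===== PRECONDITION & SPEC =====
def Spec_find_whisperers_1d (row : List Int) (out : Int × List Int) : Prop := out = find_whisperers_1d_alt row
instance (row : List Int) (out : Int × List Int) : Decidable (Spec_find_whisperers_1d row out) := by unfold Spec_find_whisperers_1d; infer_instance

-- ===== CLAIM (what is proved, stated in full; the proofs are below) =====
def Claim_equal_find_whisperers_1d : Prop := ∀ (row : List Int), Dom_find_whisperers_1d row → Spec_find_whisperers_1d row (find_whisperers_1d row)

-- ===== LEMMAS AND PROOFS =====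

-- Python max(a, b) on ints (returns the first argument on ties); proof-side only
def pyMax (a b : Int) : Int := if a ≥ b then a else b

-- the dp values (first component) and A's choice bits (second component) for indices ≥ 2,
-- given the two previous dp values d2, d1 and the remaining row elements
def buildDC (d2 d1 : Int) : List Int → List Int × List Int
  | [] => ([], [])
  | x :: xs =>
    let d := pyMax (d2 + x) d1
    let p := buildDC d1 d xs
    (d :: p.1, (if d2 + x > d1 then (1:Int) else 0) :: p.2)

-- the selection produced by walking i from the top, selecting where sel holds, jumping 2 on select
def walkP (sel : Int → Bool) (i : Int) : List Int :=
  if h : 0 ≤ i then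
    if sel i then
      (if 0 < i then walkP sel (i - 2) ++ [0, 1] else [1])
    else walkP sel (i - 1) ++ [0]
  else []
termination_by (i + 1).toNat
decreasing_by all_goals omega

-- the selection predicate read off a choice list
def selOf (P : List Int) : Int → Bool := fun j => decide (PySem.List.pyGetD P j 0 = 1)

lemma getD_append_self (pre l : List Int) (a d : Int) :
    (pre ++ a :: l).getD pre.length d = a := by
  simp [List.getD]

lemma getD_append_succ (pre l : List Int) (a b d : Int) :
    (pre ++ a :: b :: l).getD (pre.length + 1) d = b := by
  have h : pre ++ a :: b :: l = (pre ++ [a]) ++ b :: l := by simp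
  have h2 : pre.length + 1 = (pre ++ [a]).length := by simp
  rw [h, h2, getD_append_self]

lemma set_append_self (pre l : List Int) (a v : Int) :
    (pre ++ a :: l).set pre.length v = pre ++ v :: l := by
  rw [List.set_append_right _ _ (Nat.le_refl _)]
  simp

lemma foldA_eq (xs : List Int) : ∀ (rpre pre cpre : List Int) (d2 d1 : Int),
    rpre.length = pre.length + 2 → cpre.length = pre.length + 2 →
    List.foldl (loopBodyA (rpre ++ xs))
      (pre ++ [d2, d1] ++ List.replicate xs.length 0, cpre ++ List.replicate xs.length 0)
      (PySem.List.pyRange ((pre.length : Int) + 2) ((pre.length : Int) + 2 + xs.length) 1)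
    = (pre ++ d2 :: d1 :: (buildDC d2 d1 xs).1, cpre ++ (buildDC d2 d1 xs).2) := by
  induction xs with
  | nil =>
    intro rpre pre cpre d2 d1 hr hc
    rw [PySem.List.pyRange_one_eq_nil (by simp)]
    simp [buildDC]
  | cons x xs ih =>
    intro rpre pre cpre d2 d1 hr hc
    rw [PySem.List.pyRange_one_cons (by simp only [List.length_cons]; push_cast; omega)]
    simp only [List.foldl_cons]
    have hi2 : ((pre.length : Int) + 2) - 2 = (pre.length : Int) := by ring
    have hi1 : ((pre.length : Int) + 2) - 1 = ((pre.length + 1 : Nat) : Int) := by push_cast; ring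
    have hii : ((pre.length : Int) + 2) = ((pre.length + 2 : Nat) : Int) := by push_cast; ring
    have hrow : PySem.List.pyGetD (rpre ++ x :: xs) ((pre.length : Int) + 2) 0 = x := by
      have : ((pre.length : Int) + 2) = ((rpre.length : Nat) : Int) := by rw [hr]; push_cast; ring
      rw [this, PySem.List.pyGetD_natCast, getD_append_self]
    have hdp : pre ++ [d2, d1] ++ List.replicate (x :: xs).length 0
        = pre ++ d2 :: d1 :: (0:Int) :: List.replicate xs.length 0 := by simp [List.replicate_succ]
    have hd2 : PySem.List.pyGetD (pre ++ d2 :: d1 :: (0:Int) :: List.replicate xs.length 0) ((pre.length : Int) + 2 - 2) 0 = d2 := by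
      rw [hi2, PySem.List.pyGetD_natCast, getD_append_self]
    have hd1 : PySem.List.pyGetD (pre ++ d2 :: d1 :: (0:Int) :: List.replicate xs.length 0) ((pre.length : Int) + 2 - 1) 0 = d1 := by
      rw [hi1, PySem.List.pyGetD_natCast, getD_append_succ]
    have hset : ∀ v : Int, PySem.List.pySetD (pre ++ d2 :: d1 :: (0:Int) :: List.replicate xs.length 0) ((pre.length : Int) + 2) v
        = (pre ++ [d2]) ++ [d1, v] ++ List.replicate xs.length 0 := by
      intro v
      rw [hii, PySem.List.pySetD_natCast]
      have h3 : pre ++ d2 :: d1 :: (0:Int) :: List.replicate xs.length 0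
          = (pre ++ [d2, d1]) ++ (0:Int) :: List.replicate xs.length 0 := by simp
      have h4 : pre.length + 2 = (pre ++ [d2, d1]).length := by simp
      rw [h3, h4, set_append_self]
      simp
    have hcset : PySem.List.pySetD (cpre ++ List.replicate (x :: xs).length 0) ((pre.length : Int) + 2) 1
        = (cpre ++ [1]) ++ List.replicate xs.length 0 := by
      rw [hii, PySem.List.pySetD_natCast]
      have h3 : cpre ++ List.replicate (x :: xs).length (0:Int)
          = cpre ++ (0:Int) :: List.replicate xs.length 0 := by simp [List.replicate_succ]
      rw [h3, ← hc, set_append_self]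
      simp
    have hc0 : cpre ++ List.replicate (x :: xs).length (0:Int)
          = (cpre ++ [0]) ++ List.replicate xs.length 0 := by simp [List.replicate_succ]
    rw [hdp]
    by_cases hgt : d2 + x > d1
    · have hstep : loopBodyA (rpre ++ x :: xs)
          (pre ++ d2 :: d1 :: (0:Int) :: List.replicate xs.length 0, cpre ++ List.replicate (x :: xs).length 0)
          ((pre.length : Int) + 2)
          = ((pre ++ [d2]) ++ [d1, d2 + x] ++ List.replicate xs.length 0, (cpre ++ [1]) ++ List.replicate xs.length 0) := by
        unfold loopBodyA
        simp only [hrow, hd2, hd1]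
        rw [if_pos hgt]
        rw [hset, hcset]
      rw [hstep]
      have hrw : rpre ++ x :: xs = (rpre ++ [x]) ++ xs := by simp
      have hrng : PySem.List.pyRange ((pre.length : Int) + 2 + 1) ((pre.length : Int) + 2 + (x :: xs).length) 1
          = PySem.List.pyRange (((pre ++ [d2]).length : Int) + 2) (((pre ++ [d2]).length : Int) + 2 + xs.length) 1 := by
        congr 1 <;> (simp only [List.length_append, List.length_cons, List.length_nil]; push_cast; ring)
      rw [hrw, hrng]
      rw [ih (rpre ++ [x]) (pre ++ [d2]) (cpre ++ [1]) d1 (d2 + x) (by simp [hr]) (by simp [hc])]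
      have hmax : pyMax (d2 + x) d1 = d2 + x := by simp only [pyMax, if_pos (by omega : d2 + x ≥ d1)]
      simp [buildDC, hmax, hgt]
    · have hstep : loopBodyA (rpre ++ x :: xs)
          (pre ++ d2 :: d1 :: (0:Int) :: List.replicate xs.length 0, cpre ++ List.replicate (x :: xs).length 0)
          ((pre.length : Int) + 2)
          = ((pre ++ [d2]) ++ [d1, d1] ++ List.replicate xs.length 0, (cpre ++ [0]) ++ List.replicate xs.length 0) := by
        unfold loopBodyA
        simp only [hrow, hd2, hd1]
        rw [if_neg hgt]
        rw [hset]
        rw [hc0]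
      rw [hstep]
      have hrw : rpre ++ x :: xs = (rpre ++ [x]) ++ xs := by simp
      have hrng : PySem.List.pyRange ((pre.length : Int) + 2 + 1) ((pre.length : Int) + 2 + (x :: xs).length) 1
          = PySem.List.pyRange (((pre ++ [d2]).length : Int) + 2) (((pre ++ [d2]).length : Int) + 2 + xs.length) 1 := by
        congr 1 <;> (simp only [List.length_append, List.length_cons, List.length_nil]; push_cast; ring)
      rw [hrw, hrng]
      rw [ih (rpre ++ [x]) (pre ++ [d2]) (cpre ++ [0]) d1 d1 (by simp [hr]) (by simp [hc])]
      have hmax : pyMax (d2 + x) d1 = d1 := by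
        simp only [pyMax]
        split_ifs with h
        · omega
        · rfl
      simp [buildDC, hmax, hgt]

lemma walkP_pos (sel : Int → Bool) (i : Int) (h : 0 ≤ i) :
    walkP sel i = if sel i then (if 0 < i then walkP sel (i - 2) ++ [0, 1] else [1])
      else walkP sel (i - 1) ++ [0] := by
  rw [walkP, dif_pos h]

lemma walkP_neg (sel : Int → Bool) (i : Int) (h : ¬ 0 ≤ i) : walkP sel i = [] := by
  rw [walkP, dif_neg h]

lemma reconA_pos (choice result : List Int) (i : Int) (h : 0 ≤ i) :
    reconA choice result i = if PySem.List.pyGetD choice i 0 = 1 then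
        reconA choice (PySem.List.pySetD result i 1) (i - 2)
      else reconA choice result (i - 1) := by
  rw [reconA, dif_pos h]

lemma reconA_neg (choice result : List Int) (i : Int) (h : ¬ 0 ≤ i) :
    reconA choice result i = result := by
  rw [reconA, dif_neg h]

lemma walkP_congr (sel1 sel2 : Int → Bool) : ∀ (n : Nat) (i : Int), (i+1).toNat = n →
    (∀ j : Int, 0 ≤ j → j ≤ i → sel1 j = sel2 j) →
    walkP sel1 i = walkP sel2 i := by
  intro n
  induction n using Nat.strong_induction_on with
  | _ n ihn =>
    intro i hn hsel
    by_cases h0 : 0 ≤ i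
    · have hsi := hsel i h0 (le_refl _)
      rw [walkP_pos sel1 i h0, walkP_pos sel2 i h0, ← hsi]
      by_cases hs : sel1 i = true
      · rw [if_pos hs, if_pos hs]
        by_cases hpos : 0 < i
        · rw [if_pos hpos, if_pos hpos,
            ihn (i-1).toNat (by omega) (i-2) (by omega) (fun j h1 h2 => hsel j h1 (by omega))]
        · rw [if_neg hpos, if_neg hpos]
      · rw [if_neg hs, if_neg hs,
          ihn i.toNat (by omega) (i-1) (by omega) (fun j h1 h2 => hsel j h1 (by omega))]
    · rw [walkP_neg sel1 i h0, walkP_neg sel2 i h0]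

lemma reconA_eq (choice : List Int) : ∀ (n : Nat) (i : Int), (i+1).toNat = n →
    ∀ (result : List Int),
    (∀ j : Nat, (j : Int) ≤ i → result.getD j 0 = 0) →
    i < (result.length : Int) →
    reconA choice result i
      = walkP (selOf choice) i ++ result.drop (i+1).toNat := by
  intro n
  induction n using Nat.strong_induction_on with
  | _ n ihn =>
    intro i hn result hz hlen
    by_cases h0 : 0 ≤ i
    · rw [reconA_pos choice result i h0, walkP_pos _ i h0]
      by_cases hs : PySem.List.pyGetD choice i 0 = 1
      · rw [if_pos hs, if_pos (by simpa [selOf] using hs)]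
        have hitn : i.toNat < result.length := by omega
        have hset : PySem.List.pySetD result i 1 = result.set i.toNat 1 := by
          exact PySem.List.pySetD_of_nonneg result 1 h0
        rw [hset]
        rw [ihn (i-1).toNat (by omega) (i-2) (by omega) _
            (fun j hj => by
              rw [List.getD, List.getElem?_set_ne (by omega)]
              exact hz j (by omega))
            (by simp; omega)]
        by_cases hpos : 0 < i
        · rw [if_pos hpos]
          have h1 : (i - 2 + 1).toNat = (i-1).toNat := by omega
          have hd1 : (result.set i.toNat 1).drop (i-1).toNat
              = 0 :: 1 :: result.drop (i+1).toNat := by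
            rw [List.drop_eq_getElem_cons (l := result.set i.toNat 1) (by simp; omega)]
            rw [List.drop_eq_getElem_cons (l := result.set i.toNat 1) (by simp; omega)]
            have e1 : (result.set i.toNat 1)[(i-1).toNat]'(by simp; omega) = 0 := by
              rw [List.getElem_set_ne (by omega)]
              have := hz (i-1).toNat (by omega)
              rw [List.getD, List.getElem?_eq_getElem (by omega)] at this
              simpa using this
            have e2 : (result.set i.toNat 1)[(i-1).toNat + 1]'(by simp; omega) = 1 := by
              have h3 : (i-1).toNat + 1 = i.toNat := by omega
              simp only [h3]
              simp
            rw [e1, e2]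
            congr 1
            congr 1
            rw [List.drop_set_of_lt (by omega)]
            congr 1
            omega
          rw [h1, hd1]
          simp
        · rw [if_neg hpos]
          have hi0 : i = 0 := by omega
          subst hi0
          rw [walkP_neg _ ((0:Int) - 2) (by omega)]
          have hres : result.set (0:Int).toNat 1 = 1 :: result.drop 1 := by
            rcases result with _ | ⟨r, rs⟩
            · simp at hitn
            · simp
          rw [hres]
          simp
      · rw [if_neg hs, if_neg (by simpa [selOf] using hs)]
        rw [ihn i.toNat (by omega) (i-1) (by omega) _ (fun j hj => hz j (by omega)) (by omega)]
        have hd : result.drop (i-1+1).toNat = 0 :: result.drop (i+1).toNat := by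
          rw [List.drop_eq_getElem_cons (by omega)]
          have hzz := hz i.toNat (by omega)
          rw [List.getD, List.getElem?_eq_getElem (by omega)] at hzz
          simp at hzz
          have e : (i-1+1).toNat = i.toNat := by omega
          simp only [e]
          rw [hzz]
          have e2 : i.toNat + 1 = (i+1).toNat := by omega
          rw [e2]
        rw [hd]
        simp
    · rw [reconA_neg choice result i h0, walkP_neg _ i h0]
      have h1 : (i+1).toNat = 0 := by omega
      simp [h1]

-- selOf agrees on the prefix after appending
lemma selOf_append (P Q : List Int) (j : Int) (h0 : 0 ≤ j) (hj : j < (P.length : Int)) :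
    selOf (P ++ Q) j = selOf P j := by
  obtain ⟨k, rfl⟩ : ∃ k : Nat, j = (k : Int) := ⟨j.toNat, by omega⟩
  simp only [selOf, PySem.List.pyGetD_natCast]
  rw [List.getD_append _ _ _ _ (by omega)]

lemma selOf_top (P : List Int) (b : Int) :
    selOf (P ++ [b]) ((P.length : Int)) = decide (b = 1) := by
  simp only [selOf]
  rw [PySem.List.pyGetD_natCast, getD_append_self P [] b 0]

-- B's forward fold, characterised: the value is the last dp, the selection is walkP reversed
lemma foldB_walk : ∀ (rest P : List Int) (d2 d1 : Int) (s2 s1 : List Int),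
    2 ≤ P.length →
    s2 = (walkP (selOf P) ((P.length : Int) - 2)).reverse →
    s1 = (walkP (selOf P) ((P.length : Int) - 1)).reverse →
    ∃ a b, rest.foldl stepB (d2, s2, d1, s1)
      = (a, b, (buildDC d2 d1 rest).1.getLastD d1,
         (walkP (selOf (P ++ (buildDC d2 d1 rest).2)) ((P.length : Int) - 1 + rest.length)).reverse) := by
  intro rest
  induction rest with
  | nil =>
    intro P d2 d1 s2 s1 hP hs2 hs1
    refine ⟨d2, s2, ?_⟩
    simp [buildDC, hs1]
  | cons x xs ih =>
    intro P d2 d1 s2 s1 hP hs2 hs1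
    simp only [List.foldl_cons]
    have hlenP : ((P ++ [if d2 + x > d1 then (1:Int) else 0]).length : Int) = (P.length : Int) + 1 := by
      simp
    by_cases hgt : d2 + x > d1
    · have hstep : stepB (d2, s2, d1, s1) x = (d1, s1, d2 + x, 1 :: 0 :: s2) := by
        simp only [stepB]
        rw [if_pos hgt]
      rw [hstep]
      set P' := P ++ [(1:Int)] with hP'
      have hagree : ∀ j : Int, 0 ≤ j → j ≤ (P.length : Int) - 1 → selOf P' j = selOf P j := by
        intro j h0 hj
        exact selOf_append P [1] j h0 (by omega)
      have hs2' : s1 = (walkP (selOf P') ((P'.length : Int) - 2)).reverse := by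
        rw [hs1]
        congr 1
        have e : (P'.length : Int) - 2 = (P.length : Int) - 1 := by simp only [hP', List.length_append, List.length_cons, List.length_nil]; push_cast; omega
        rw [e]
        exact (walkP_congr _ _ _ _ rfl (fun j h1 h2 => (hagree j h1 h2).symm))
      have hs1' : 1 :: 0 :: s2 = (walkP (selOf P') ((P'.length : Int) - 1)).reverse := by
        have e : (P'.length : Int) - 1 = ((P.length : Nat) : Int) := by simp only [hP', List.length_append, List.length_cons, List.length_nil]; push_cast; omega
        rw [e, walkP_pos _ _ (by omega)]
        have htop : selOf P' ((P.length : Nat) : Int) = true := by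
          rw [hP', selOf_top]
          decide
        rw [htop, if_pos rfl, if_pos (by omega : (0:Int) < ((P.length : Nat) : Int))]
        rw [hs2]
        have e2 : ((P.length : Nat) : Int) - 2 = (P.length : Int) - 2 := by omega
        rw [e2, walkP_congr (selOf P') (selOf P) _ _ rfl (fun j h1 h2 => hagree j h1 (by omega))]
        simp
      obtain ⟨a, b, hfold⟩ := ih P' d1 (d2 + x) s1 (1 :: 0 :: s2) (by simp only [hP', List.length_append, List.length_cons, List.length_nil]; push_cast; omega) hs2' hs1'
      refine ⟨a, b, ?_⟩
      rw [hfold]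
      have hmax : pyMax (d2 + x) d1 = d2 + x := by simp only [pyMax, if_pos (by omega : d2 + x ≥ d1)]
      have hbdc : buildDC d2 d1 (x :: xs) = ((d2 + x) :: (buildDC d1 (d2 + x) xs).1, 1 :: (buildDC d1 (d2 + x) xs).2) := by
        simp [buildDC, hmax, hgt]
      rw [hbdc]
      have hPP : P' ++ (buildDC d1 (d2 + x) xs).2 = P ++ 1 :: (buildDC d1 (d2 + x) xs).2 := by
        simp [hP']
      rw [hPP]
      have hidx : (P'.length : Int) - 1 + (xs.length : Int) = (P.length : Int) - 1 + ((x :: xs).length : Int) := by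
        simp only [hP', List.length_append, List.length_cons, List.length_nil]; push_cast; omega
      rw [hidx]
      simp only [List.getLastD_cons]
    · have hstep : stepB (d2, s2, d1, s1) x = (d1, s1, d1, 0 :: s1) := by
        simp only [stepB]
        rw [if_neg hgt]
      rw [hstep]
      set P' := P ++ [(0:Int)] with hP'
      have hagree : ∀ j : Int, 0 ≤ j → j ≤ (P.length : Int) - 1 → selOf P' j = selOf P j := by
        intro j h0 hj
        exact selOf_append P [0] j h0 (by omega)
      have hs2' : s1 = (walkP (selOf P') ((P'.length : Int) - 2)).reverse := by
        rw [hs1]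
        congr 1
        have e : (P'.length : Int) - 2 = (P.length : Int) - 1 := by simp only [hP', List.length_append, List.length_cons, List.length_nil]; push_cast; omega
        rw [e]
        exact (walkP_congr _ _ _ _ rfl (fun j h1 h2 => (hagree j h1 h2).symm))
      have hs1' : 0 :: s1 = (walkP (selOf P') ((P'.length : Int) - 1)).reverse := by
        have e : (P'.length : Int) - 1 = ((P.length : Nat) : Int) := by simp only [hP', List.length_append, List.length_cons, List.length_nil]; push_cast; omega
        rw [e, walkP_pos _ _ (by omega)]
        have htop : selOf P' ((P.length : Nat) : Int) = false := by
          rw [hP', selOf_top]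
          decide
        rw [htop]
        simp only [Bool.false_eq_true, if_false]
        rw [hs1]
        have e2 : ((P.length : Nat) : Int) - 1 = (P.length : Int) - 1 := by omega
        rw [e2, walkP_congr (selOf P') (selOf P) _ _ rfl (fun j h1 h2 => hagree j h1 (by omega))]
        simp
      obtain ⟨a, b, hfold⟩ := ih P' d1 d1 s1 (0 :: s1) (by simp only [hP', List.length_append, List.length_cons, List.length_nil]; push_cast; omega) hs2' hs1'
      refine ⟨a, b, ?_⟩
      rw [hfold]
      have hmax : pyMax (d2 + x) d1 = d1 := by
        simp only [pyMax]
        split_ifs with h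
        · omega
        · rfl
      have hbdc : buildDC d2 d1 (x :: xs) = (d1 :: (buildDC d1 d1 xs).1, 0 :: (buildDC d1 d1 xs).2) := by
        simp [buildDC, hmax, hgt]
      rw [hbdc]
      have hPP : P' ++ (buildDC d1 d1 xs).2 = P ++ 0 :: (buildDC d1 d1 xs).2 := by
        simp [hP']
      rw [hPP]
      have hidx : (P'.length : Int) - 1 + (xs.length : Int) = (P.length : Int) - 1 + ((x :: xs).length : Int) := by
        simp only [hP', List.length_append, List.length_cons, List.length_nil]; push_cast; omega
      rw [hidx]
      simp only [List.getLastD_cons]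

lemma getLast_cons2 : ∀ (L : List Int) (x d1 : Int) (h : x :: d1 :: L ≠ []),
    (x :: d1 :: L).getLast h = L.getLastD d1 := by
  intro L
  induction L with
  | nil => intro x d1 h; simp [List.getLast]
  | cons a L ih =>
    intro x d1 h
    rw [List.getLast_cons (by simp)]
    rw [ih d1 a (by simp)]
    simp only [List.getLastD_cons]

lemma pyGetD_neg_one_cons2 (x d1 : Int) (L : List Int) :
    PySem.List.pyGetD (x :: d1 :: L) (-1) 0 = L.getLastD d1 := by
  have h2 : (x :: d1 :: L).getLast (by simp) = L.getLastD d1 := getLast_cons2 L x d1 _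
  simp [PySem.List.pyGetD_neg_one, h2]

lemma pyGetD_cons2_one (a b : Int) (l : List Int) :
    PySem.List.pyGetD (a :: b :: l) (1:Int) 0 = b := by
  have h1 : (1:Int) = ((1:Nat) : Int) := by norm_num
  rw [h1, PySem.List.pyGetD_natCast]
  rfl

-- A's reconstruction written as walkP over the full choice list
lemma coreA (x c1 d1 : Int) (rest : List Int) :
    reconA (1 :: c1 :: (buildDC x d1 rest).2) (List.replicate (rest.length + 2) 0) ((rest.length : Int) + 2 - 1)
      = walkP (selOf (1 :: c1 :: (buildDC x d1 rest).2)) ((rest.length : Int) + 1) := by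
  have hz : ∀ j : Nat, (j : Int) ≤ (rest.length : Int) + 2 - 1 →
      (List.replicate (rest.length + 2) (0:Int)).getD j 0 = 0 := by
    intro j _
    simp [List.getD, List.getElem?_replicate]
    split <;> rfl
  rw [reconA_eq _ (rest.length + 2) _ (by omega) _ hz (by simp)]
  have hdr : ((rest.length : Int) + 2 - 1 + 1).toNat = rest.length + 2 := by omega
  rw [hdr, List.drop_replicate]
  have hi : ((rest.length : Int) + 2 - 1) = (rest.length : Int) + 1 := by ring
  rw [hi]
  simp

-- initial-state selections for B at P = [1, c1]
lemma walkP_init0 (c1 : Int) : (walkP (selOf [1, c1]) (((2:Nat) : Int) - 2)).reverse = [1] := by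
  have e : (((2:Nat) : Int) - 2) = (0:Int) := by norm_num
  rw [e, walkP_pos _ _ (by omega)]
  have h0 : selOf [1, c1] 0 = true := by
    simp [selOf, PySem.List.pyGetD_zero_cons]
  rw [h0, if_pos rfl, if_neg (by omega : ¬ (0:Int) < 0)]
  rfl

lemma walkP_init1_true : (walkP (selOf [1, 1]) (((2:Nat) : Int) - 1)).reverse = [1, 0] := by
  have e : (((2:Nat) : Int) - 1) = (1:Int) := by norm_num
  rw [e, walkP_pos _ _ (by omega)]
  have h1 : selOf [1, 1] 1 = true := by
    simp [selOf, pyGetD_cons2_one]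
  rw [h1, if_pos rfl, if_pos (by omega : (0:Int) < 1)]
  rw [walkP_neg _ _ (by omega : ¬ (0:Int) ≤ 1 - 2)]
  rfl

lemma walkP_init1_false : (walkP (selOf [1, 0]) (((2:Nat) : Int) - 1)).reverse = [0, 1] := by
  have e : (((2:Nat) : Int) - 1) = (1:Int) := by norm_num
  rw [e, walkP_pos _ _ (by omega)]
  have h1 : selOf [1, 0] 1 = false := by
    simp [selOf, pyGetD_cons2_one]
  rw [h1]
  simp only [Bool.false_eq_true, if_false]
  rw [walkP_pos _ _ (by omega : (0:Int) ≤ 1 - 1)]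
  have h0 : selOf [1, 0] (1 - 1) = true := by
    simp [selOf, PySem.List.pyGetD_zero_cons]
  rw [h0, if_pos rfl, if_neg (by omega : ¬ (0:Int) < 1 - 1)]
  rfl

-- main assembly for rows of length >= 2
lemma main_eq (x y : Int) (rest : List Int) :
    find_whisperers_1d (x :: y :: rest) = find_whisperers_1d_alt (x :: y :: rest) := by
  have hrep : List.replicate (x :: y :: rest).length (0:Int)
      = 0 :: 0 :: List.replicate rest.length 0 := by
    simp [List.replicate_succ]
  have hsetD0 : ∀ (a b : Int) (l : List Int) (v : Int),
      PySem.List.pySetD (a :: b :: l) (0:Int) v = v :: b :: l := by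
    intro a b l v
    rw [PySem.List.pySetD_of_nonneg _ _ (by omega)]
    simp
  have hsetD1 : ∀ (a b : Int) (l : List Int) (v : Int),
      PySem.List.pySetD (a :: b :: l) (1:Int) v = a :: v :: l := by
    intro a b l v
    rw [PySem.List.pySetD_of_nonneg _ _ (by omega)]
    simp
  have hrep2 : (0:Int) :: 0 :: List.replicate rest.length 0 = List.replicate (rest.length + 2) 0 := by
    simp [List.replicate_succ]
  have hcast : ((x :: y :: rest).length : Int) - 1 = (rest.length : Int) + 2 - 1 := by
    simp; omega
  rw [find_whisperers_1d, find_whisperers_1d_alt]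
  dsimp only
  rw [if_neg (by omega), if_neg (by omega)]
  rw [PySem.List.pyGetD_zero_cons, pyGetD_cons2_one, hrep, hsetD0, hsetD0]
  have hrange : PySem.List.pyRange 2 ((x :: y :: rest).length : Int) 1
      = PySem.List.pyRange 2 (2 + (rest.length : Int)) 1 := by
    congr 1
    simp; omega
  by_cases hyx : y > x
  · rw [if_pos hyx, hsetD1, hsetD1]
    have hfold := foldA_eq rest [x, y] [] [1, 1] x y (by simp) (by simp)
    simp only [List.nil_append, List.length_nil, Nat.cast_zero, zero_add, List.cons_append] at hfold
    rw [hrange, hfold]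
    dsimp only
    rw [if_pos hyx]
    obtain ⟨a, b, hB⟩ := foldB_walk rest [1, 1] x y [1] [1, 0] (by norm_num)
      (walkP_init0 1).symm walkP_init1_true.symm
    rw [hB, hrep2, hcast, coreA x 1 y rest, pyGetD_neg_one_cons2]
    dsimp only
    simp only [Prod.mk.injEq, List.reverse_reverse]
    refine ⟨trivial, ?_⟩
    have hsel : selOf ([1, (1:Int)] ++ (buildDC x (y) rest).2) = selOf (1 :: (1:Int) :: (buildDC x (y) rest).2) := by simp
    have hidx : (([1, (1:Int)].length : Int) - 1 + (rest.length : Int)) = (rest.length : Int) + 1 := by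
      simp only [List.length_cons, List.length_nil]; push_cast; ring
    rw [hsel, hidx]
  · rw [if_neg hyx, hsetD1]
    have hfold := foldA_eq rest [x, y] [] [1, 0] x x (by simp) (by simp)
    simp only [List.nil_append, List.length_nil, Nat.cast_zero, zero_add, List.cons_append] at hfold
    rw [hrange, hfold]
    dsimp only
    rw [if_neg hyx]
    obtain ⟨a, b, hB⟩ := foldB_walk rest [1, 0] x x [1] [0, 1] (by norm_num)
      (walkP_init0 0).symm walkP_init1_false.symm
    rw [hB, hrep2, hcast, coreA x 0 x rest, pyGetD_neg_one_cons2]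
    dsimp only
    simp only [Prod.mk.injEq, List.reverse_reverse]
    refine ⟨trivial, ?_⟩
    have hsel : selOf ([1, (0:Int)] ++ (buildDC x (x) rest).2) = selOf (1 :: (0:Int) :: (buildDC x (x) rest).2) := by simp
    have hidx : (([1, (0:Int)].length : Int) - 1 + (rest.length : Int)) = (rest.length : Int) + 1 := by
      simp only [List.length_cons, List.length_nil]; push_cast; ring
    rw [hsel, hidx]

-- ===== VERDICT (by name: the statement is the Claim_ definition above) =====
theorem find_whisperers_1d_spec : Claim_equal_find_whisperers_1d := by
  intro row _
  unfold Spec_find_whisperers_1d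
  rcases row with _ | ⟨x, _ | ⟨y, rest⟩⟩
  · rfl
  · simp [find_whisperers_1d, find_whisperers_1d_alt, PySem.List.pyGetD_zero_cons]
  · exact main_eq x y rest
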